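-- pv_equiv track=rewrite | github.com/jeppsontaylor/neverhuman | gary/apps/forged/planner.py | _find_affected_tests
-- ===== SOURCE A (Python) =====
-- def _find_affected_tests(target_files: list[str]) -> list[str]:
--     """Find tests that cover the target files.
--
--     In production, this would query the code_atlas test_map table.
--     For now, uses simple prefix matching.
--     """
--     tests = set()
--
--     for f in target_files:
--         if f.startswith("pipeline/turn_supervisor"):
--             tests.add("testing/test_floor_sovereignty.py")
--             tests.add("testing/test_turn_control.py")
--         elif f.startswith("pipeline/turn_classifier"):
--             tests.add("testing/test_turn_classifier.py")
--         elif f.startswith("mind/"):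
--             tests.add("testing/test_scheduler.py")
--             tests.add("testing/test_validators.py")
--         elif f.startswith("core/self_model"):
--             tests.add("testing/test_self_pack.py")
--         elif f.startswith("core/change_router"):
--             tests.add("testing/test_change_router.py")
--
--     return sorted(tests)
-- ===== SOURCE B (Python) =====
-- _TEST_MAP = [
--     ("pipeline/turn_supervisor",
--      ["testing/test_floor_sovereignty.py", "testing/test_turn_control.py"]),
--     ("pipeline/turn_classifier",
--      ["testing/test_turn_classifier.py"]),
--     ("mind/",
--      ["testing/test_scheduler.py", "testing/test_validators.py"]),
--     ("core/self_model",
--      ["testing/test_self_pack.py"]),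
--     ("core/change_router",
--      ["testing/test_change_router.py"]),
-- ]
--
--
-- def _find_affected_tests(target_files: list[str]) -> list[str]:
--     """Find tests that cover the target files (prefix-map table version)."""
--     tests = set()
--     for f in target_files:
--         for prefix, covered in _TEST_MAP:
--             if f.startswith(prefix):
--                 tests.update(covered)
--     return sorted(tests)
-- ===== Notes on version B (the rewrite author's own statement) =====
-- stated objective: idiomatic
-- what changed: Replaces the hard-coded if/elif chain with a data-driven (prefix, tests) table scanned in a nested loop, collecting every matching entry; the five prefixes are pairwise disjoint, so all-matches equals first-match.
import Mathlib
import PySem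

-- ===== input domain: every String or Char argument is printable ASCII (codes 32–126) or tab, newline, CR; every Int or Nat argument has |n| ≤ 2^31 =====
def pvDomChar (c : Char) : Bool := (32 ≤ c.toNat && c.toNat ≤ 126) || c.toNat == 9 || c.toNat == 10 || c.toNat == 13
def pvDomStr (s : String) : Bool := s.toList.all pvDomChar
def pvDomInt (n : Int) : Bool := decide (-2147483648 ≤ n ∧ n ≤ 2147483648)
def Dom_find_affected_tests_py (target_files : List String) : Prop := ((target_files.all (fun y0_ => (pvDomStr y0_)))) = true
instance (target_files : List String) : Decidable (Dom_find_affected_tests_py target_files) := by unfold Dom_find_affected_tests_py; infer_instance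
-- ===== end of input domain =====

-- B replaces the hard-coded if/elif chain with a data-driven (prefix, tests) table
-- scanned in a nested loop (idiomatic; the disjoint prefixes make all-matches = first-match).

-- ===== PORT A =====
def find_affected_tests_py (target_files : List String) : List String :=
  let tests : PySem.Set String := target_files.foldl (fun tests f =>
    if PySem.Str.startswith f "pipeline/turn_supervisor" then
      PySem.Set.add (PySem.Set.add tests "testing/test_floor_sovereignty.py") "testing/test_turn_control.py"
    else if PySem.Str.startswith f "pipeline/turn_classifier" then
      PySem.Set.add tests "testing/test_turn_classifier.py"
    else if PySem.Str.startswith f "mind/" then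
      PySem.Set.add (PySem.Set.add tests "testing/test_scheduler.py") "testing/test_validators.py"
    else if PySem.Str.startswith f "core/self_model" then
      PySem.Set.add tests "testing/test_self_pack.py"
    else if PySem.Str.startswith f "core/change_router" then
      PySem.Set.add tests "testing/test_change_router.py"
    else tests) PySem.Set.empty
  PySem.List.sorted tests (fun x => x) false

-- ===== PORT B =====
def pvTestMap : List (String × List String) :=
  [("pipeline/turn_supervisor", ["testing/test_floor_sovereignty.py", "testing/test_turn_control.py"]),
   ("pipeline/turn_classifier", ["testing/test_turn_classifier.py"]),
   ("mind/", ["testing/test_scheduler.py", "testing/test_validators.py"]),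
   ("core/self_model", ["testing/test_self_pack.py"]),
   ("core/change_router", ["testing/test_change_router.py"])]

def find_affected_tests_py_alt (target_files : List String) : List String :=
  let tests : PySem.Set String := target_files.foldl (fun tests f =>
    pvTestMap.foldl (fun tests entry =>
      if PySem.Str.startswith f entry.1 then PySem.Set.update tests entry.2 else tests) tests)
    PySem.Set.empty
  PySem.List.sorted tests (fun x => x) false

-- ===== PRECONDITION & SPEC =====
def Spec_find_affected_tests_py (target_files : List String) (out : List String) : Prop := out = find_affected_tests_py_alt target_files
instance (target_files : List String) (out : List String) : Decidable (Spec_find_affected_tests_py target_files out) := by unfold Spec_find_affected_tests_py; infer_instance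

-- ===== CLAIM (what is proved, stated in full; the proofs are below) =====
def Claim_equal_find_affected_tests_py : Prop := ∀ (target_files : List String), Dom_find_affected_tests_py target_files → Spec_find_affected_tests_py target_files (find_affected_tests_py target_files)

-- ===== LEMMAS AND PROOFS =====

/-- If `p` starts `f` and `q` is neither a prefix of `p` nor `p` of `q`,
then `q` does not start `f`. -/
theorem pv_not_both_prefix (p q f : String)
    (hnpq : ¬ p.toList <+: q.toList) (hnqp : ¬ q.toList <+: p.toList)
    (hp : PySem.Str.startswith f p = true) :
    PySem.Str.startswith f q = false := by
  by_contra h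
  have hq : PySem.Str.startswith f q = true := by
    cases hh : PySem.Str.startswith f q <;> simp_all
  rw [PySem.Str.startswith_eq, PySem.Chars.startswith_iff] at hp hq
  rcases List.prefix_or_prefix_of_prefix hp hq with h1 | h1
  · exact hnpq h1
  · exact hnqp h1

/-- The per-file step of A equals the per-file step of B. -/
theorem pv_step_eq (tests : PySem.Set String) (f : String) :
    (if PySem.Str.startswith f "pipeline/turn_supervisor" then
      PySem.Set.add (PySem.Set.add tests "testing/test_floor_sovereignty.py") "testing/test_turn_control.py"
    else if PySem.Str.startswith f "pipeline/turn_classifier" then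
      PySem.Set.add tests "testing/test_turn_classifier.py"
    else if PySem.Str.startswith f "mind/" then
      PySem.Set.add (PySem.Set.add tests "testing/test_scheduler.py") "testing/test_validators.py"
    else if PySem.Str.startswith f "core/self_model" then
      PySem.Set.add tests "testing/test_self_pack.py"
    else if PySem.Str.startswith f "core/change_router" then
      PySem.Set.add tests "testing/test_change_router.py"
    else tests)
    = pvTestMap.foldl (fun tests entry =>
        if PySem.Str.startswith f entry.1 then PySem.Set.update tests entry.2 else tests) tests := by
  simp only [pvTestMap, List.foldl_cons, List.foldl_nil]
  by_cases h1 : PySem.Str.startswith f "pipeline/turn_supervisor" = true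
  · have := pv_not_both_prefix _ "pipeline/turn_classifier" f (by decide) (by decide) h1
    have := pv_not_both_prefix _ "mind/" f (by decide) (by decide) h1
    have := pv_not_both_prefix _ "core/self_model" f (by decide) (by decide) h1
    have := pv_not_both_prefix _ "core/change_router" f (by decide) (by decide) h1
    simp_all [PySem.Set.update, List.foldl]
  by_cases h2 : PySem.Str.startswith f "pipeline/turn_classifier" = true
  · have := pv_not_both_prefix _ "mind/" f (by decide) (by decide) h2
    have := pv_not_both_prefix _ "core/self_model" f (by decide) (by decide) h2
    have := pv_not_both_prefix _ "core/change_router" f (by decide) (by decide) h2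
    simp_all [PySem.Set.update, List.foldl]
  by_cases h3 : PySem.Str.startswith f "mind/" = true
  · have := pv_not_both_prefix _ "core/self_model" f (by decide) (by decide) h3
    have := pv_not_both_prefix _ "core/change_router" f (by decide) (by decide) h3
    simp_all [PySem.Set.update, List.foldl]
  by_cases h4 : PySem.Str.startswith f "core/self_model" = true
  · have := pv_not_both_prefix _ "core/change_router" f (by decide) (by decide) h4
    simp_all [PySem.Set.update, List.foldl]
  by_cases h5 : PySem.Str.startswith f "core/change_router" = true
  · simp_all [PySem.Set.update, List.foldl]
  · simp_all

-- ===== VERDICT (by name: the statement is the Claim_ definition above) =====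
theorem find_affected_tests_py_spec : Claim_equal_find_affected_tests_py := by
  intro target_files _
  unfold Spec_find_affected_tests_py find_affected_tests_py find_affected_tests_py_alt
  have h : ∀ (l : List String) (s : PySem.Set String),
      l.foldl (fun tests f =>
        if PySem.Str.startswith f "pipeline/turn_supervisor" then
          PySem.Set.add (PySem.Set.add tests "testing/test_floor_sovereignty.py") "testing/test_turn_control.py"
        else if PySem.Str.startswith f "pipeline/turn_classifier" then
          PySem.Set.add tests "testing/test_turn_classifier.py"
        else if PySem.Str.startswith f "mind/" then
          PySem.Set.add (PySem.Set.add tests "testing/test_scheduler.py") "testing/test_validators.py"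
        else if PySem.Str.startswith f "core/self_model" then
          PySem.Set.add tests "testing/test_self_pack.py"
        else if PySem.Str.startswith f "core/change_router" then
          PySem.Set.add tests "testing/test_change_router.py"
        else tests) s
      = l.foldl (fun tests f =>
          pvTestMap.foldl (fun tests entry =>
            if PySem.Str.startswith f entry.1 then PySem.Set.update tests entry.2 else tests) tests) s := by
    intro l
    induction l with
    | nil => intro s; rfl
    | cons f t ih => intro s; simp only [List.foldl_cons, pv_step_eq]
  exact congrArg (fun t => PySem.List.sorted t (fun x => x) false) (h target_files PySem.Set.empty)
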